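-- pv_equiv track=rewrite | github.com/Dark-Ghost-x/QX-ShadowDrop | core/modules/tech_stack.py | detect_backend
-- ===== SOURCE A (Python) =====
-- from typing import List, Dict, Any
--
-- BACKEND_HINTS = {
--     "php": "PHP",
--     "asp.net": "ASP.NET",
--     "express": "Node.js (Express)",
--     "django": "Python (Django)",
--     "flask": "Python (Flask)",
--     "ruby": "Ruby",
--     "laravel": "PHP (Laravel)",
--     "symfony": "PHP (Symfony)",
--     "spring": "Java (Spring)",
--     "wordpress": "WordPress",
--     "joomla": "Joomla",
--     "drupal": "Drupal",
--     "magento": "Magento",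
--     "shopify": "Shopify",
--     "prestashop": "PrestaShop",
--     "opencart": "OpenCart",
--     "woocommerce": "WooCommerce",
--     "rails": "Ruby on Rails",
--     "fastapi": "Python (FastAPI)",
--     "nestjs": "Node.js (NestJS)",
--     "next.js": "Next.js",
--     "nuxt.js": "Nuxt.js"
-- }
--
-- def detect_backend(html: str, headers: Dict[str, str]) -> List[str]:
--     found = set()
--     content_lower = html.lower()
--     headers_lower = {k.lower(): v.lower() for k, v in headers.items()}
--     for key, name in BACKEND_HINTS.items():
--         if key in content_lower:
--             found.add(name)
--     for header_value in headers_lower.values():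
--         for key, name in BACKEND_HINTS.items():
--             if key in header_value:
--                 found.add(name)
--     return sorted(found)
-- ===== SOURCE B (Python) =====
-- from typing import List, Dict
--
-- BACKEND_HINTS = {
--     "php": "PHP",
--     "asp.net": "ASP.NET",
--     "express": "Node.js (Express)",
--     "django": "Python (Django)",
--     "flask": "Python (Flask)",
--     "ruby": "Ruby",
--     "laravel": "PHP (Laravel)",
--     "symfony": "PHP (Symfony)",
--     "spring": "Java (Spring)",
--     "wordpress": "WordPress",
--     "joomla": "Joomla",
--     "drupal": "Drupal",
--     "magento": "Magento",
--     "shopify": "Shopify",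
--     "prestashop": "PrestaShop",
--     "opencart": "OpenCart",
--     "woocommerce": "WooCommerce",
--     "rails": "Ruby on Rails",
--     "fastapi": "Python (FastAPI)",
--     "nestjs": "Node.js (NestJS)",
--     "next.js": "Next.js",
--     "nuxt.js": "Nuxt.js"
-- }
--
-- def detect_backend(html: str, headers: Dict[str, str]) -> List[str]:
--     # Substring-index approach: enumerate every substring of bounded length of the
--     # corpora once into a hash set, then answer each hint key by one O(1) lookup.
--     corpora = [html.lower()] + [v.lower() for v in headers.values()]
--     maxlen = max(len(k) for k in BACKEND_HINTS)
--     subs = set()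
--     for text in corpora:
--         for i in range(len(text)):
--             for l in range(1, maxlen + 1):
--                 subs.add(text[i:i + l])
--     return sorted(name for key, name in BACKEND_HINTS.items() if key in subs)
-- ===== Notes on version B (the rewrite author's own statement) =====
-- stated objective: alternative
-- what changed: B builds a substring index once -- a hash set of every substring of length at most max key length (11) of the lowered html and header values -- and then answers each of the 22 hint keys by a single set lookup, instead of A's per-key substring scans over the html and each header value.
-- outside the precondition, e.g. on detect_backend('', {'X': 'php', 'x': ''}): A returns [], B returns ['PHP']
import Mathlib
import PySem

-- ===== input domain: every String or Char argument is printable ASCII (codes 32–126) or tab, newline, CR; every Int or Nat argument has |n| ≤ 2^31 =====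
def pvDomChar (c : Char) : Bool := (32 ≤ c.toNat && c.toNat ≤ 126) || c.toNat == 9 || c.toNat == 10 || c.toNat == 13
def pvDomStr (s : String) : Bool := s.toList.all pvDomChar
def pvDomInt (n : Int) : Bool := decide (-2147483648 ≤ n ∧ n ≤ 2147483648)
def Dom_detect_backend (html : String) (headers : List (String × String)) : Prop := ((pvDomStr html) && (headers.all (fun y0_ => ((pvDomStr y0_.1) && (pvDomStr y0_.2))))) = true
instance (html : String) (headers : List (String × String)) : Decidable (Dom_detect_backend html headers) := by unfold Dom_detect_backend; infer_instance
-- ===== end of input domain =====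

-- B builds a hash index of every substring (of length ≤ the longest key) of the lowered
-- corpora once, then answers each hint key by a single set lookup, instead of A's per-key
-- substring scans over the html and each header value (objective: alternative).

def backendHints : List (String × String) :=
  [("php", "PHP"), ("asp.net", "ASP.NET"), ("express", "Node.js (Express)"),
   ("django", "Python (Django)"), ("flask", "Python (Flask)"), ("ruby", "Ruby"),
   ("laravel", "PHP (Laravel)"), ("symfony", "PHP (Symfony)"), ("spring", "Java (Spring)"),
   ("wordpress", "WordPress"), ("joomla", "Joomla"), ("drupal", "Drupal"),
   ("magento", "Magento"), ("shopify", "Shopify"), ("prestashop", "PrestaShop"),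
   ("opencart", "OpenCart"), ("woocommerce", "WooCommerce"), ("rails", "Ruby on Rails"),
   ("fastapi", "Python (FastAPI)"), ("nestjs", "Node.js (NestJS)"),
   ("next.js", "Next.js"), ("nuxt.js", "Nuxt.js")]

-- ===== PORT A =====
def detect_backend (html : String) (headers : List (String × String)) : List String :=
  let contentLower := PySem.Str.lower html
  let headersLower : PySem.Dict String String :=
    headers.foldl (fun d p => d.insert (PySem.Str.lower p.1) (PySem.Str.lower p.2)) PySem.Dict.empty
  let found : PySem.Set String :=
    backendHints.foldl
      (fun s p => if PySem.Str.isIn p.1 contentLower then PySem.Set.add s p.2 else s)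
      PySem.Set.empty
  let found2 : PySem.Set String :=
    (headersLower.values).foldl
      (fun s hv =>
        backendHints.foldl
          (fun s p => if PySem.Str.isIn p.1 hv then PySem.Set.add s p.2 else s) s)
      found
  PySem.List.sorted found2 (fun x => x) false

-- ===== PORT B =====
def detect_backend_alt (html : String) (headers : List (String × String)) : List String :=
  let corpora : List String := PySem.Str.lower html :: headers.map (fun p => PySem.Str.lower p.2)
  -- max(len(k) for k in BACKEND_HINTS); .getD 0 only totalizes max() (the list is non-empty)
  let maxlen : Int := (PySem.List.max? (backendHints.map (fun p => PySem.Str.len p.1)) (fun x => x)).getD 0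
  let subs : PySem.Set String :=
    corpora.foldl
      (fun s text =>
        (PySem.List.pyRange 0 (PySem.Str.len text) 1).foldl
          (fun s i =>
            (PySem.List.pyRange 1 (maxlen + 1) 1).foldl
              (fun s l => PySem.Set.add s (PySem.Str.slice text (some i) (some (i + l)))) s)
          s)
      PySem.Set.empty
  PySem.List.sorted
    ((backendHints.filter (fun p => PySem.Set.contains subs p.1)).map (fun p => p.2))
    (fun x => x) false

-- ===== PRECONDITION & SPEC =====
-- Pre_ excludes headers whose keys collide after lowercasing: there A's dict comprehension
-- silently drops all but the last colliding value (an accidental dict-overwrite corner),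
-- while B searches every header value.
def Pre_detect_backend (html : String) (headers : List (String × String)) : Prop :=
  (headers.map (fun p => PySem.Str.lower p.1)).Nodup
instance (html : String) (headers : List (String × String)) : Decidable (Pre_detect_backend html headers) := by unfold Pre_detect_backend; infer_instance

def pvWitness_detect_backend : String × (List (String × String)) :=
  ("<b>Powered by PHP</b>", [("Server", "nginx"), ("X-Powered-By", "Express")])

def Spec_detect_backend (html : String) (headers : List (String × String)) (out : List String) : Prop := out = detect_backend_alt html headers
instance (html : String) (headers : List (String × String)) (out : List String) : Decidable (Spec_detect_backend html headers out) := by unfold Spec_detect_backend; infer_instance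

-- ===== CLAIM (what is proved, stated in full; the proofs are below) =====
def Claim_equal_detect_backend : Prop := ∀ (html : String) (headers : List (String × String)), Dom_detect_backend html headers → Pre_detect_backend html headers → Spec_detect_backend html headers (detect_backend html headers)

-- ===== LEMMAS AND PROOFS =====

-- ---- A-side fold characterizations ----
theorem mem_hitFold (l : List (String × String)) (hay : String) (s : List String) (x : String) :
    x ∈ l.foldl (fun s p => if PySem.Str.isIn p.1 hay then PySem.Set.add s p.2 else s) s ↔
      x ∈ s ∨ ∃ p ∈ l, PySem.Str.isIn p.1 hay = true ∧ x = p.2 := by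
  induction l generalizing s with
  | nil => simp
  | cons q t ih =>
      simp only [List.foldl_cons, ih, List.mem_cons]
      by_cases h : PySem.Str.isIn q.1 hay = true
      · rw [if_pos h]
        simp only [PySem.Set.mem_add]
        constructor
        · rintro ((hx | rfl) | ⟨p, hp, hc, rfl⟩)
          · exact Or.inl hx
          · exact Or.inr ⟨q, Or.inl rfl, h, rfl⟩
          · exact Or.inr ⟨p, Or.inr hp, hc, rfl⟩
        · rintro (hx | ⟨p, (rfl | hp), hc, rfl⟩)
          · exact Or.inl (Or.inl hx)
          · exact Or.inl (Or.inr rfl)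
          · exact Or.inr ⟨p, hp, hc, rfl⟩
      · rw [if_neg h]
        constructor
        · rintro (hx | ⟨p, hp, hc, rfl⟩)
          · exact Or.inl hx
          · exact Or.inr ⟨p, Or.inr hp, hc, rfl⟩
        · rintro (hx | ⟨p, (rfl | hp), hc, rfl⟩)
          · exact Or.inl hx
          · exact absurd hc h
          · exact Or.inr ⟨p, hp, hc, rfl⟩

theorem nodup_hitFold (l : List (String × String)) (hay : String) (s : List String)
    (hs : s.Nodup) :
    (l.foldl (fun s p => if PySem.Str.isIn p.1 hay then PySem.Set.add s p.2 else s) s).Nodup := by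
  induction l generalizing s with
  | nil => simpa
  | cons q t ih =>
      simp only [List.foldl_cons]
      apply ih
      split
      · exact PySem.Set.nodup_add _ _ hs
      · exact hs

theorem mem_outerFold (vs : List String) (s : List String) (x : String) :
    x ∈ vs.foldl
        (fun s hv =>
          backendHints.foldl
            (fun s p => if PySem.Str.isIn p.1 hv then PySem.Set.add s p.2 else s) s) s ↔
      x ∈ s ∨ ∃ v ∈ vs, ∃ p ∈ backendHints, PySem.Str.isIn p.1 v = true ∧ x = p.2 := by
  induction vs generalizing s with
  | nil => simp
  | cons v t ih =>
      simp only [List.foldl_cons, ih, mem_hitFold, List.mem_cons]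
      constructor
      · rintro ((hx | ⟨p, hp, hc, rfl⟩) | ⟨w, hw, p, hp, hc, rfl⟩)
        · exact Or.inl hx
        · exact Or.inr ⟨v, Or.inl rfl, p, hp, hc, rfl⟩
        · exact Or.inr ⟨w, Or.inr hw, p, hp, hc, rfl⟩
      · rintro (hx | ⟨w, (rfl | hw), p, hp, hc, rfl⟩)
        · exact Or.inl (Or.inl hx)
        · exact Or.inl (Or.inr ⟨p, hp, hc, rfl⟩)
        · exact Or.inr ⟨w, hw, p, hp, hc, rfl⟩

theorem nodup_outerFold (vs : List String) (s : List String) (hs : s.Nodup) :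
    (vs.foldl
        (fun s hv =>
          backendHints.foldl
            (fun s p => if PySem.Str.isIn p.1 hv then PySem.Set.add s p.2 else s) s) s).Nodup := by
  induction vs generalizing s with
  | nil => simpa
  | cons v t ih => exact ih _ (nodup_hitFold _ _ _ hs)

theorem values_lowerDict (headers : List (String × String))
    (h : (headers.map (fun p => PySem.Str.lower p.1)).Nodup) :
    (headers.foldl
        (fun d p => d.insert (PySem.Str.lower p.1) (PySem.Str.lower p.2))
        (PySem.Dict.empty : PySem.Dict String String)).values =
      headers.map (fun p => PySem.Str.lower p.2) := by
  have hitems := PySem.Dict.items_foldl_insert_fresh (l := headers)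
      (k := fun p => PySem.Str.lower p.1) (v := fun p => PySem.Str.lower p.2)
      (d := (PySem.Dict.empty : PySem.Dict String String))
      (by intro a _; simp [PySem.Dict.contains_empty]) h
  simp only [PySem.Dict.values, hitems]
  simp [PySem.Dict.empty, List.map_map, Function.comp]

-- ---- B-side fold characterizations ----
theorem mem_addFold (L : List Int) (f : Int → String) (s : List String) (x : String) :
    x ∈ L.foldl (fun s l => PySem.Set.add s (f l)) s ↔ x ∈ s ∨ ∃ l ∈ L, x = f l := by
  induction L generalizing s with
  | nil => simp
  | cons a t ih =>
      simp only [List.foldl_cons, ih, PySem.Set.mem_add, List.mem_cons]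
      constructor
      · rintro ((hx | rfl) | ⟨l, hl, rfl⟩)
        · exact Or.inl hx
        · exact Or.inr ⟨a, Or.inl rfl, rfl⟩
        · exact Or.inr ⟨l, Or.inr hl, rfl⟩
      · rintro (hx | ⟨l, (rfl | hl), rfl⟩)
        · exact Or.inl (Or.inl hx)
        · exact Or.inl (Or.inr rfl)
        · exact Or.inr ⟨l, hl, rfl⟩

theorem mem_posFold (text : String) (R2 L : List Int) (s : List String) (x : String) :
    x ∈ L.foldl
        (fun s i => R2.foldl
          (fun s l => PySem.Set.add s (PySem.Str.slice text (some i) (some (i + l)))) s) s ↔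
      x ∈ s ∨ ∃ i ∈ L, ∃ l ∈ R2, x = PySem.Str.slice text (some i) (some (i + l)) := by
  induction L generalizing s with
  | nil => simp
  | cons a t ih =>
      simp only [List.foldl_cons, ih, mem_addFold, List.mem_cons]
      constructor
      · rintro ((hx | ⟨l, hl, rfl⟩) | ⟨i, hi, l, hl, rfl⟩)
        · exact Or.inl hx
        · exact Or.inr ⟨a, Or.inl rfl, l, hl, rfl⟩
        · exact Or.inr ⟨i, Or.inr hi, l, hl, rfl⟩
      · rintro (hx | ⟨i, (rfl | hi), l, hl, rfl⟩)
        · exact Or.inl (Or.inl hx)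
        · exact Or.inl (Or.inr ⟨l, hl, rfl⟩)
        · exact Or.inr ⟨i, hi, l, hl, rfl⟩

theorem mem_corporaFold (cs : List String) (R2 : List Int) (s : List String) (x : String) :
    x ∈ cs.foldl
        (fun s text =>
          (PySem.List.pyRange 0 (PySem.Str.len text) 1).foldl
            (fun s i => R2.foldl
              (fun s l => PySem.Set.add s (PySem.Str.slice text (some i) (some (i + l)))) s) s) s ↔
      x ∈ s ∨ ∃ t ∈ cs, ∃ i ∈ PySem.List.pyRange 0 (PySem.Str.len t) 1, ∃ l ∈ R2,
        x = PySem.Str.slice t (some i) (some (i + l)) := by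
  induction cs generalizing s with
  | nil => simp
  | cons c t ih =>
      simp only [List.foldl_cons, ih, mem_posFold, List.mem_cons]
      constructor
      · rintro ((hx | ⟨i, hi, l, hl, rfl⟩) | ⟨w, hw, i, hi, l, hl, rfl⟩)
        · exact Or.inl hx
        · exact Or.inr ⟨c, Or.inl rfl, i, hi, l, hl, rfl⟩
        · exact Or.inr ⟨w, Or.inr hw, i, hi, l, hl, rfl⟩
      · rintro (hx | ⟨w, (rfl | hw), i, hi, l, hl, rfl⟩)
        · exact Or.inl (Or.inl hx)
        · exact Or.inl (Or.inr ⟨i, hi, l, hl, rfl⟩)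
        · exact Or.inr ⟨w, hw, i, hi, l, hl, rfl⟩

-- ---- substring-index characterization ----
theorem key_in_iff (key text : String) (h1 : key.toList ≠ []) (h2 : key.toList.length ≤ 11) :
    (∃ i ∈ PySem.List.pyRange 0 (PySem.Str.len text) 1, ∃ l ∈ PySem.List.pyRange 1 12 1,
        key = PySem.Str.slice text (some i) (some (i + l))) ↔
      PySem.Str.isIn key text = true := by
  constructor
  · rintro ⟨i, hi, l, hl, rfl⟩
    rw [PySem.List.mem_pyRange_one] at hi hl
    have h0i : 0 ≤ i := hi.1
    have h0il : 0 ≤ i + l := by omega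
    have htl : (PySem.Str.slice text (some i) (some (i + l))).toList =
        List.take ((i + l).toNat - i.toNat) (List.drop i.toNat text.toList) := by
      rw [PySem.Str.toList_slice, PySem.Chars.slice_eq_listSlice,
        PySem.List.slice_toNat _ h0i h0il]
    rw [PySem.Str.isIn_iff_infix, ← PySem.Chars.isIn_iff_infix,
      ← PySem.Chars.exists_prefix_drop_iff_isIn]
    exact ⟨i.toNat, by rw [htl]; exact List.take_prefix _ _⟩
  · intro hin
    rw [PySem.Str.isIn_iff_infix, ← PySem.Chars.isIn_iff_infix,
      ← PySem.Chars.exists_prefix_drop_iff_isIn] at hin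
    obtain ⟨j, hpre⟩ := hin
    have hklen : 1 ≤ key.toList.length := List.length_pos_iff.mpr h1
    have hj : j < text.toList.length := by
      by_contra hge
      have : List.drop j text.toList = [] := List.drop_eq_nil_iff.mpr (by omega)
      rw [this, List.prefix_nil] at hpre
      exact h1 hpre
    refine ⟨(j : Int), ?_, (key.toList.length : Int), ?_, ?_⟩
    · rw [PySem.List.mem_pyRange_one, PySem.Str.len_eq]
      constructor <;> [exact Int.natCast_nonneg j; exact_mod_cast hj]
    · rw [PySem.List.mem_pyRange_one]
      constructor <;> [exact_mod_cast hklen; exact_mod_cast Nat.lt_succ_of_le h2]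
    · rw [← String.toList_inj, PySem.Str.toList_slice, PySem.Chars.slice_eq_listSlice,
        PySem.List.slice_toNat _ (Int.natCast_nonneg j) (by positivity)]
      have : ((j : Int) + (key.toList.length : Int)).toNat - (j : Int).toNat =
          key.toList.length := by omega
      rw [this, Int.toNat_natCast]
      exact List.prefix_iff_eq_take.mp hpre

theorem hints_keys_fact : ∀ p ∈ backendHints, p.1.toList ≠ [] ∧ p.1.toList.length ≤ 11 := by
  decide

theorem maxlen_eq :
    (PySem.List.max? (backendHints.map (fun p => PySem.Str.len p.1)) (fun x => x)).getD 0 = 11 := by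
  decide

theorem nodup_b_list (c : String × String → Bool) :
    ((backendHints.filter c).map (fun p => p.2)).Nodup := by
  have hsub : ((backendHints.filter c).map (fun p => p.2)).Sublist
      (backendHints.map (fun p => p.2)) :=
    List.Sublist.map _ List.filter_sublist
  exact hsub.nodup (by decide)

-- ===== VERDICT (by name: the statement is the Claim_ definition above) =====
theorem detect_backend_spec : Claim_equal_detect_backend := by
  intro html headers _ hpre
  unfold Spec_detect_backend detect_backend detect_backend_alt
  simp only []
  rw [values_lowerDict headers hpre, maxlen_eq]
  have h12 : (11 : Int) + 1 = 12 := by norm_num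
  rw [h12]
  apply PySem.List.sorted_eq_sorted_of_perm
  · intro a b hab; exact hab
  · refine (List.perm_ext_iff_of_nodup
      (nodup_outerFold _ _ (nodup_hitFold _ _ _ List.nodup_nil)) (nodup_b_list _)).mpr ?_
    intro x
    simp only [mem_outerFold, mem_hitFold, List.not_mem_nil, false_or,
      List.mem_map, List.mem_filter]
    constructor
    · rintro (⟨p, hp, hc, rfl⟩ | ⟨v, hv, p, hp, hc, rfl⟩)
      · refine ⟨p, ⟨hp, ?_⟩, rfl⟩
        rw [PySem.Set.contains_iff, mem_corporaFold]
        refine Or.inr ⟨PySem.Str.lower html, List.mem_cons_self, ?_⟩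
        exact (key_in_iff _ _ (hints_keys_fact p hp).1 (hints_keys_fact p hp).2).mpr hc
      · refine ⟨p, ⟨hp, ?_⟩, rfl⟩
        rw [PySem.Set.contains_iff, mem_corporaFold]
        refine Or.inr ⟨v, List.mem_cons_of_mem _ (List.mem_map.mpr hv), ?_⟩
        exact (key_in_iff _ _ (hints_keys_fact p hp).1 (hints_keys_fact p hp).2).mpr hc
    · rintro ⟨p, ⟨hp, hc⟩, rfl⟩
      rw [PySem.Set.contains_iff, mem_corporaFold] at hc
      rcases hc with h | ⟨t, ht, hex⟩
      · exact absurd h (List.not_mem_nil)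
      · have hin : PySem.Str.isIn p.1 t = true :=
          (key_in_iff _ _ (hints_keys_fact p hp).1 (hints_keys_fact p hp).2).mp hex
        rcases List.mem_cons.mp ht with rfl | hv
        · exact Or.inl ⟨p, hp, hin, rfl⟩
        · exact Or.inr ⟨t, List.mem_map.mp hv, p, hp, hin, rfl⟩
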